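-- pv_equiv track=rewrite | github.com/kiraskywing/Code_Practice | Bitwise/Medium/LET_no2802_Find The K-th Lucky Number.py | kthLuckyNumber
-- ===== SOURCE A (Python) =====
-- def kthLuckyNumber(k: int) -> str:
--     k += 1
--     res = []
--     while k != 1:
--         res.append('7' if k & 1 else '4')
--         k //= 2
--
--     res.reverse()
--     return ''.join(res)
-- ===== SOURCE B (Python) =====
-- def kthLuckyNumber(k: int) -> str:
--     # find the digit length L: subtract off the 2^d lucky numbers of each length d
--     n = k
--     L = 0
--     while n > 0:
--         L += 1
--         n -= 1 << L
--     if L == 0: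
--         return ''
--     # 0-based offset within the length-L level
--     offset = n + (1 << L) - 1
--     return ''.join('7' if (offset >> (L - 1 - i)) & 1 else '4' for i in range(L))
-- ===== Notes on version B (the rewrite author's own statement) =====
-- stated objective: alternative
-- what changed: A peels bits of k+1 LSB-first in a list and reverses; B first finds the digit length L by subtracting the 2^d level counts, computes the 0-based offset in that level, and renders the L bits of the offset MSB-first directly.
import Mathlib
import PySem

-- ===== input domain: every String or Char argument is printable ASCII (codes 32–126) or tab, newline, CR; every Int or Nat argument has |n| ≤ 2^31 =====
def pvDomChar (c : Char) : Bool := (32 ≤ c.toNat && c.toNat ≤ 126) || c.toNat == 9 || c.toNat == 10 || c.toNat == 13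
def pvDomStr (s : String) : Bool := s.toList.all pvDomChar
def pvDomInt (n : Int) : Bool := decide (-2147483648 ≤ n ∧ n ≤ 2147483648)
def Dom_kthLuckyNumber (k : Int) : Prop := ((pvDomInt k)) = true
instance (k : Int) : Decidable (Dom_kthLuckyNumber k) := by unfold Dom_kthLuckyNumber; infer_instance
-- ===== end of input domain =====

-- B computes the k-th lucky number by level/offset arithmetic instead of A's bit-peel-and-reverse (objective: alternative, same cost).

-- ===== PORT A =====
-- while k != 1: res.append('7' if k & 1 else '4'); k //= 2
-- (the guard 2 ≤ k stops exactly where Python stops for k ≥ 1; for k ≤ 0 Python diverges, excluded by Pre_)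
def aLoop (k : Int) (res : List Char) : List Char :=
  if _h : 2 ≤ k then
    aLoop (PySem.Int.floordiv k 2) (res ++ [if Int.land k 1 ≠ 0 then '7' else '4'])
  else res
termination_by k.toNat
decreasing_by
  have h2 : PySem.Int.floordiv k 2 = k / 2 := PySem.Int.floordiv_eq_ediv_of_pos (by omega)
  rw [h2]; omega

def kthLuckyNumber (k : Int) : String :=
  String.mk (aLoop (k + 1) []).reverse

-- ===== PORT B =====
-- while n > 0: L += 1; n -= 1 << L
def bLevel (n : Int) (L : Nat) : Int × Nat :=
  if _h : 0 < n then bLevel (n - 2 ^ (L + 1)) (L + 1) else (n, L)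
termination_by n.toNat
decreasing_by
  have h2 : (0:Int) < 2 ^ (L + 1) := by positivity
  omega

-- offset ≥ 0 whenever the L ≠ 0 branch is reached, so '.toNat' makes Python's '>>' and '& 1' exact here
def kthLuckyNumber_alt (k : Int) : String :=
  let p := bLevel k 0
  let L := p.2
  if L = 0 then ""
  else
    let offset := p.1 + 2 ^ L - 1
    String.mk ((List.range L).map (fun i =>
      if (offset.toNat >>> (L - 1 - i)) &&& 1 = 1 then '7' else '4'))

-- ===== PRECONDITION & SPEC =====
-- Pre_ excludes k < 0, on which Python A's loop never reaches 1 and diverges.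
def Pre_kthLuckyNumber (k : Int) : Prop := 0 ≤ k
instance (k : Int) : Decidable (Pre_kthLuckyNumber k) := by unfold Pre_kthLuckyNumber; infer_instance
def pvWitness_kthLuckyNumber : Int := (5)

def Spec_kthLuckyNumber (k : Int) (out : String) : Prop := out = kthLuckyNumber_alt k
instance (k : Int) (out : String) : Decidable (Spec_kthLuckyNumber k out) := by unfold Spec_kthLuckyNumber; infer_instance

-- ===== CLAIM (what is proved, stated in full; the proofs are below) =====
def Claim_equal_kthLuckyNumber : Prop := ∀ (k : Int), Dom_kthLuckyNumber k → Pre_kthLuckyNumber k → Spec_kthLuckyNumber k (kthLuckyNumber k)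

-- ===== LEMMAS AND PROOFS =====

-- reference: LSB-first lucky digits of n with the leading 1 dropped
def gRef (n : Nat) : List Char :=
  if _h : n < 2 then [] else (if n % 2 = 1 then '7' else '4') :: gRef (n / 2)
decreasing_by omega

theorem land_one_mod (n : Nat) : Int.land (n : Int) 1 = ((n % 2 : Nat) : Int) := by
  have h : Int.land (Int.ofNat n) (Int.ofNat 1) = Int.ofNat (n &&& 1) := rfl
  simpa [Nat.and_one_is_mod] using h

theorem aLoop_eq_gRef (m : Nat) : ∀ (k : Int) (res : List Char), 0 ≤ k → k.toNat = m →
    aLoop k res = res ++ gRef k.toNat := by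
  induction m using Nat.strong_induction_on with
  | _ m ih =>
    intro k res hk hm
    rw [aLoop, gRef]
    by_cases h2 : 2 ≤ k
    · have hfd : PySem.Int.floordiv k 2 = k / 2 := PySem.Int.floordiv_eq_ediv_of_pos (by omega)
      simp only [h2, dif_pos, hfd]
      have hlt : (k / 2).toNat < m := by omega
      rw [ih _ hlt (k / 2) _ (by omega) rfl]
      have hnlt : ¬ (k.toNat < 2) := by omega
      simp only [hnlt, dif_neg, not_false_iff]
      have hland : Int.land k 1 = ((k.toNat % 2 : Nat) : Int) := by
        obtain ⟨n, rfl⟩ := Int.eq_ofNat_of_zero_le hk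
        simpa using land_one_mod n
      have hdiv : (k / 2).toNat = k.toNat / 2 := by omega
      rw [hland, hdiv]
      by_cases hp : k.toNat % 2 = 1
      · simp [hp]
      · have h0 : k.toNat % 2 = 0 := by omega
        simp [h0]
    · have hsm : k.toNat < 2 := by omega
      simp [h2, hsm]

-- bLevel invariant for positive start
theorem bLevel_char (m : Nat) : ∀ (n : Int) (L : Nat), 0 < n → n.toNat = m →
    (bLevel n L).1 ≤ 0 ∧ 1 - 2 ^ ((bLevel n L).2) ≤ (bLevel n L).1 ∧
    (bLevel n L).1 = n - (2 ^ ((bLevel n L).2 + 1) - 2 ^ (L + 1)) ∧ L < (bLevel n L).2 := by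
  induction m using Nat.strong_induction_on with
  | _ m ih =>
    intro n L hn hm
    rw [bLevel]
    simp only [hn, dif_pos]
    have hp : (0:Int) < 2 ^ (L + 1) := by positivity
    by_cases h2 : 0 < n - 2 ^ (L + 1)
    · have hlt : (n - 2 ^ (L + 1)).toNat < m := by omega
      obtain ⟨a, b, c, d⟩ := ih _ hlt (n - 2 ^ (L + 1)) (L + 1) h2 rfl
      refine ⟨a, b, ?_, by omega⟩
      rw [c]
      have e : (2:Int) ^ (L + 1 + 1) = 2 * 2 ^ (L + 1) := by ring
      omega
    · rw [bLevel]
      simp only [h2, dif_neg, not_false_iff]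
      have e : (2:Int) ^ (L + 1 + 1) = 2 * 2 ^ (L + 1) := by ring
      refine ⟨by omega, by omega, by omega, by omega⟩

-- render lemma: the MSB-first bits of o over L positions are the reverse of gRef (2^L + o)
theorem render_eq (L : Nat) : ∀ (o : Nat), o < 2 ^ L →
    (List.range L).map (fun i => if (o >>> (L - 1 - i)) &&& 1 = 1 then '7' else '4')
      = (gRef (2 ^ L + o)).reverse := by
  induction L with
  | zero =>
    intro o ho
    interval_cases o
    simp [gRef]
  | succ L ihL =>
    intro o ho
    have hm2 : ¬ (2 ^ (L + 1) + o < 2) := by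
      have h22 : 2 ≤ 2 ^ (L + 1) := by
        calc 2 = 2 ^ 1 := by norm_num
        _ ≤ 2 ^ (L + 1) := Nat.pow_le_pow_right (by norm_num) (by omega)
      omega
    rw [gRef]
    simp only [hm2, dif_neg, not_false_iff]
    have hdiv : (2 ^ (L + 1) + o) / 2 = 2 ^ L + o / 2 := by
      rw [pow_succ]
      omega
    have hmod : (2 ^ (L + 1) + o) % 2 = o % 2 := by
      rw [pow_succ]
      omega
    rw [hdiv, hmod, List.reverse_cons, ← ihL (o / 2) (by rw [pow_succ] at ho; omega)]
    rw [List.range_succ, List.map_append]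
    congr 1
    · apply List.map_congr_left
      intro i hi
      have hi' : i < L := List.mem_range.mp hi
      have hs : o >>> (L + 1 - 1 - i) = (o / 2) >>> (L - 1 - i) := by
        rw [Nat.shiftRight_eq_div_pow, Nat.shiftRight_eq_div_pow, Nat.div_div_eq_div_mul]
        congr 1
        rw [← pow_succ']
        congr 1
        omega
      rw [hs]
    · simp only [List.map_cons, List.map_nil]
      have hz : L + 1 - 1 - L = 0 := by omega
      rw [hz]
      have ho1 : o >>> 0 &&& 1 = o % 2 := by
        rw [Nat.shiftRight_zero, Nat.and_one_is_mod]
      rw [ho1]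

-- ===== VERDICT (by name: the statement is the Claim_ definition above) =====
theorem kthLuckyNumber_spec : Claim_equal_kthLuckyNumber := by
  intro k _ hk
  have hk0 : 0 ≤ k := hk
  unfold Spec_kthLuckyNumber kthLuckyNumber kthLuckyNumber_alt
  by_cases h0 : k = 0
  · subst h0
    rw [show bLevel 0 0 = (0, 0) from by rw [bLevel]; norm_num]
    rw [show aLoop (0 + 1) [] = [] from by rw [aLoop]; norm_num]
    rfl
  · have hk1 : 0 < k := by omega
    obtain ⟨a, b, c, d⟩ := bLevel_char k.toNat k 0 hk1 rfl
    have hLne : ¬ ((bLevel k 0).2 = 0) := by omega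
    show String.mk (aLoop (k + 1) []).reverse =
      (if (bLevel k 0).2 = 0 then "" else
        String.mk ((List.range (bLevel k 0).2).map (fun i =>
          if ((((bLevel k 0).1 + 2 ^ (bLevel k 0).2 - 1).toNat >>> ((bLevel k 0).2 - 1 - i)) &&& 1 = 1)
          then '7' else '4')))
    rw [if_neg hLne]
    have hA : aLoop (k + 1) [] = gRef (k + 1).toNat :=
      aLoop_eq_gRef (k + 1).toNat (k + 1) [] (by omega) rfl
    have hpL : (0:Int) < 2 ^ (bLevel k 0).2 := by positivity
    have h2L : ((2:Int) ^ (bLevel k 0).2).toNat = 2 ^ (bLevel k 0).2 := by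
      have hc : ((2:Int) ^ (bLevel k 0).2) = ((2 ^ (bLevel k 0).2 : Nat) : Int) := by
        push_cast; ring
      rw [hc, Int.toNat_natCast]
    have hoffub : ((bLevel k 0).1 + 2 ^ (bLevel k 0).2 - 1).toNat < 2 ^ (bLevel k 0).2 := by omega
    have hsum : (k + 1).toNat = 2 ^ (bLevel k 0).2 + ((bLevel k 0).1 + 2 ^ (bLevel k 0).2 - 1).toNat := by
      have e : (2:Int) ^ ((bLevel k 0).2 + 1) = 2 * 2 ^ (bLevel k 0).2 := by ring
      have e2 : (2:Int) ^ (0 + 1) = 2 := by norm_num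
      omega
    rw [hA, render_eq _ _ hoffub, ← hsum]

theorem kthLuckyNumber_pre_sane :
    Dom_kthLuckyNumber pvWitness_kthLuckyNumber ∧ Pre_kthLuckyNumber pvWitness_kthLuckyNumber := by
  constructor <;> decide
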